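-- pv_equiv track=rewrite | github.com/pablo-epl/kata | sudoku_solution_validator.py | get_block_sets_as_rows
-- ===== SOURCE A (Python) =====
-- def get_block_sets_as_rows(board):
--     board_block_sets = []
--     for x_coord in range(0,9, 3):
--         for y_coord in range(0, 9, 3):
--             row = []
--             for i in range(0+y_coord, 3+y_coord):
--                 row.extend(board[i][0+x_coord:3+x_coord])
--             board_block_sets.append(row)
--     return board_block_sets
-- ===== SOURCE B (Python) =====
-- def get_block_sets_as_rows(board):
--     buckets = [[] for _ in range(9)]
--     for i in range(9):
--         for j, v in enumerate(board[i][:9]):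
--             buckets[3 * (j // 3) + i // 3].append(v)
--     return buckets
-- ===== Notes on version B (the rewrite author's own statement) =====
-- stated objective: alternative
-- what changed: B replaces A's triple nested range loops that build each block by concatenating three row slices with a single row-major pass over the cells that routes every cell board[i][j] (i,j<9) into bucket 3*(j//3)+i//3; no block-by-block slicing or concatenation remains.
import Mathlib
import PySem

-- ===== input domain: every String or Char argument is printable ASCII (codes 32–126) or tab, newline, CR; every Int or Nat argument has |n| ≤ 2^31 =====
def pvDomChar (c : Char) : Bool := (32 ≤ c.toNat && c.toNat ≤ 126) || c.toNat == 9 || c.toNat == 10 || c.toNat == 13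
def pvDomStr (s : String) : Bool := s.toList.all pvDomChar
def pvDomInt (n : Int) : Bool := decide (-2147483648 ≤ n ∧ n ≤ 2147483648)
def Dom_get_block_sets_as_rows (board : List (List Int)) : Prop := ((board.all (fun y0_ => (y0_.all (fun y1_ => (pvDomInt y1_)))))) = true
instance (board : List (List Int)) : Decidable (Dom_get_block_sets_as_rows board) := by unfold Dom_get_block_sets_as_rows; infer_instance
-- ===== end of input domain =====

-- B drops A's block-by-block slicing: one row-major pass over the cells routes each
-- cell board[i][j] into bucket 3*(j//3)+i//3 (alternative decomposition, same cost).

-- ===== PORT A =====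
def get_block_sets_as_rows (board : List (List Int)) : List (List Int) :=
  (PySem.List.pyRange 0 9 3).foldl (fun bbs x =>
    (PySem.List.pyRange 0 9 3).foldl (fun bbs2 y =>
      bbs2 ++ [(PySem.List.pyRange (0 + y) (3 + y) 1).foldl
        (fun row i => row ++ PySem.List.slice (PySem.List.pyGetD board i []) (some (0 + x)) (some (3 + x))) []]) bbs) []

-- ===== PORT B =====
-- bucket index: 3*(j//3)+i//3 is always in 0..8 for i,j in 0..8, so the Int→Nat cast
-- for List.modify is exact (Python's buckets[idx].append never sees a negative idx).
def get_block_sets_as_rows_alt (board : List (List Int)) : List (List Int) :=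
  (PySem.List.pyRange 0 9 1).foldl
    (fun buckets i =>
      (PySem.List.enumerate (PySem.List.slice (PySem.List.pyGetD board i []) none (some 9))).foldl
        (fun bs jv =>
          bs.modify (3 * (PySem.Int.floordiv jv.1 3) + PySem.Int.floordiv i 3).toNat
            (fun b => b ++ [jv.2])) buckets)
    (List.replicate 9 [])

-- ===== PRECONDITION & SPEC =====
-- A indexes board[0..8], so it raises IndexError on boards with fewer than 9 rows; Pre_ excludes exactly those.
def Pre_get_block_sets_as_rows (board : List (List Int)) : Prop := 9 ≤ board.length
instance (board : List (List Int)) : Decidable (Pre_get_block_sets_as_rows board) := by unfold Pre_get_block_sets_as_rows; infer_instance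
def pvWitness_get_block_sets_as_rows : List (List Int) :=
  [[1,2,3,4,5,6,7,8,9],[9,8,7,6,5,4,3,2,1],[1,1,1],[2,2,2,2,2,2,2,2,2],[3],[],[4,4,4,4,4,4,4,4,4],[5,5,5,5,5],[6,6,6,6,6,6,6,6,6]]

def Spec_get_block_sets_as_rows (board : List (List Int)) (out : List (List Int)) : Prop := out = get_block_sets_as_rows_alt board
instance (board : List (List Int)) (out : List (List Int)) : Decidable (Spec_get_block_sets_as_rows board out) := by unfold Spec_get_block_sets_as_rows; infer_instance

-- ===== CLAIM (what is proved, stated in full; the proofs are below) =====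
def Claim_equal_get_block_sets_as_rows : Prop := ∀ (board : List (List Int)), Dom_get_block_sets_as_rows board → Pre_get_block_sets_as_rows board → Spec_get_block_sets_as_rows board (get_block_sets_as_rows board)

-- ===== LEMMAS AND PROOFS =====

-- one row of B's pass: distributing row r (index i, with i//3 concrete) into symbolic
-- buckets appends r's three column-third slices to buckets i//3, 3+i//3, 6+i//3.
theorem pvRow0 (b0 b1 b2 b3 b4 b5 b6 b7 b8 : List Int) (r : List Int) (i : Int)
    (hk : PySem.Int.floordiv i 3 = 0) :
    (PySem.List.enumerate (PySem.List.slice r none (some 9))).foldl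
      (fun bs jv => bs.modify (3 * (PySem.Int.floordiv jv.1 3) + PySem.Int.floordiv i 3).toNat
        (fun b => b ++ [jv.2])) [b0,b1,b2,b3,b4,b5,b6,b7,b8] =
    [b0 ++ PySem.List.slice r (some 0) (some 3), b1, b2, b3 ++ PySem.List.slice r (some 3) (some 6), b4, b5, b6 ++ PySem.List.slice r (some 6) (some 9), b7, b8] := by
  rw [hk]
  match r with
  | [] =>
    simp [PySem.List.slice, PySem.List.enumerate_nil, List.foldl_nil]
  | [a0] =>
    rw [show PySem.List.slice [a0] none (some 9) = [a0] from by simp [PySem.List.slice_to],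
        show PySem.List.enumerate [a0] = [((0:Int),a0)] from by
          simp [PySem.List.enumerate_cons, PySem.List.enumerate_nil]]
    simp only [List.foldl_cons, List.foldl_nil]
    norm_num [PySem.Int.floordiv]
    simp [PySem.List.slice]
  | [a0,a1] =>
    rw [show PySem.List.slice [a0,a1] none (some 9) = [a0,a1] from by simp [PySem.List.slice_to],
        show PySem.List.enumerate [a0,a1] = [((0:Int),a0),((1:Int),a1)] from by
          simp [PySem.List.enumerate_cons, PySem.List.enumerate_nil]]
    simp only [List.foldl_cons, List.foldl_nil]
    norm_num [PySem.Int.floordiv]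
    simp [PySem.List.slice, List.modify]
  | [a0,a1,a2] =>
    rw [show PySem.List.slice [a0,a1,a2] none (some 9) = [a0,a1,a2] from by simp [PySem.List.slice_to],
        show PySem.List.enumerate [a0,a1,a2] = [((0:Int),a0),((1:Int),a1),((2:Int),a2)] from by
          simp [PySem.List.enumerate_cons, PySem.List.enumerate_nil]]
    simp only [List.foldl_cons, List.foldl_nil]
    norm_num [PySem.Int.floordiv]
    simp [PySem.List.slice, List.modify]
  | [a0,a1,a2,a3] =>
    rw [show PySem.List.slice [a0,a1,a2,a3] none (some 9) = [a0,a1,a2,a3] from by simp [PySem.List.slice_to],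
        show PySem.List.enumerate [a0,a1,a2,a3] = [((0:Int),a0),((1:Int),a1),((2:Int),a2),((3:Int),a3)] from by
          simp [PySem.List.enumerate_cons, PySem.List.enumerate_nil]]
    simp only [List.foldl_cons, List.foldl_nil]
    norm_num [PySem.Int.floordiv]
    simp [PySem.List.slice, List.modify]
  | [a0,a1,a2,a3,a4] =>
    rw [show PySem.List.slice [a0,a1,a2,a3,a4] none (some 9) = [a0,a1,a2,a3,a4] from by simp [PySem.List.slice_to],
        show PySem.List.enumerate [a0,a1,a2,a3,a4] = [((0:Int),a0),((1:Int),a1),((2:Int),a2),((3:Int),a3),((4:Int),a4)] from by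
          simp [PySem.List.enumerate_cons, PySem.List.enumerate_nil]]
    simp only [List.foldl_cons, List.foldl_nil]
    norm_num [PySem.Int.floordiv]
    simp [PySem.List.slice, List.modify]
  | [a0,a1,a2,a3,a4,a5] =>
    rw [show PySem.List.slice [a0,a1,a2,a3,a4,a5] none (some 9) = [a0,a1,a2,a3,a4,a5] from by simp [PySem.List.slice_to],
        show PySem.List.enumerate [a0,a1,a2,a3,a4,a5] = [((0:Int),a0),((1:Int),a1),((2:Int),a2),((3:Int),a3),((4:Int),a4),((5:Int),a5)] from by
          simp [PySem.List.enumerate_cons, PySem.List.enumerate_nil]]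
    simp only [List.foldl_cons, List.foldl_nil]
    norm_num [PySem.Int.floordiv]
    simp [PySem.List.slice, List.modify]
  | [a0,a1,a2,a3,a4,a5,a6] =>
    rw [show PySem.List.slice [a0,a1,a2,a3,a4,a5,a6] none (some 9) = [a0,a1,a2,a3,a4,a5,a6] from by simp [PySem.List.slice_to],
        show PySem.List.enumerate [a0,a1,a2,a3,a4,a5,a6] = [((0:Int),a0),((1:Int),a1),((2:Int),a2),((3:Int),a3),((4:Int),a4),((5:Int),a5),((6:Int),a6)] from by
          simp [PySem.List.enumerate_cons, PySem.List.enumerate_nil]]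
    simp only [List.foldl_cons, List.foldl_nil]
    norm_num [PySem.Int.floordiv]
    simp [PySem.List.slice, List.modify]
  | [a0,a1,a2,a3,a4,a5,a6,a7] =>
    rw [show PySem.List.slice [a0,a1,a2,a3,a4,a5,a6,a7] none (some 9) = [a0,a1,a2,a3,a4,a5,a6,a7] from by simp [PySem.List.slice_to],
        show PySem.List.enumerate [a0,a1,a2,a3,a4,a5,a6,a7] = [((0:Int),a0),((1:Int),a1),((2:Int),a2),((3:Int),a3),((4:Int),a4),((5:Int),a5),((6:Int),a6),((7:Int),a7)] from by
          simp [PySem.List.enumerate_cons, PySem.List.enumerate_nil]]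
    simp only [List.foldl_cons, List.foldl_nil]
    norm_num [PySem.Int.floordiv]
    simp [PySem.List.slice, List.modify]
  | a0::a1::a2::a3::a4::a5::a6::a7::a8::t =>
    rw [show PySem.List.slice (a0::a1::a2::a3::a4::a5::a6::a7::a8::t) none (some 9) = [a0,a1,a2,a3,a4,a5,a6,a7,a8] from by
          simp [PySem.List.slice_to],
        show PySem.List.slice (a0::a1::a2::a3::a4::a5::a6::a7::a8::t) (some 0) (some 3) = [a0,a1,a2] from rfl,
        show PySem.List.slice (a0::a1::a2::a3::a4::a5::a6::a7::a8::t) (some 3) (some 6) = [a3,a4,a5] from rfl,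
        show PySem.List.slice (a0::a1::a2::a3::a4::a5::a6::a7::a8::t) (some 6) (some 9) = [a6,a7,a8] from rfl,
        show PySem.List.enumerate [a0,a1,a2,a3,a4,a5,a6,a7,a8] = [((0:Int),a0),((1:Int),a1),((2:Int),a2),((3:Int),a3),((4:Int),a4),((5:Int),a5),((6:Int),a6),((7:Int),a7),((8:Int),a8)] from by
          simp [PySem.List.enumerate_cons, PySem.List.enumerate_nil]]
    simp only [List.foldl_cons, List.foldl_nil]
    norm_num [PySem.Int.floordiv]
    simp [List.modify]

theorem pvRow1 (b0 b1 b2 b3 b4 b5 b6 b7 b8 : List Int) (r : List Int) (i : Int)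
    (hk : PySem.Int.floordiv i 3 = 1) :
    (PySem.List.enumerate (PySem.List.slice r none (some 9))).foldl
      (fun bs jv => bs.modify (3 * (PySem.Int.floordiv jv.1 3) + PySem.Int.floordiv i 3).toNat
        (fun b => b ++ [jv.2])) [b0,b1,b2,b3,b4,b5,b6,b7,b8] =
    [b0, b1 ++ PySem.List.slice r (some 0) (some 3), b2, b3, b4 ++ PySem.List.slice r (some 3) (some 6), b5, b6, b7 ++ PySem.List.slice r (some 6) (some 9), b8] := by
  rw [hk]
  match r with
  | [] =>
    simp [PySem.List.slice, PySem.List.enumerate_nil, List.foldl_nil]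
  | [a0] =>
    rw [show PySem.List.slice [a0] none (some 9) = [a0] from by simp [PySem.List.slice_to],
        show PySem.List.enumerate [a0] = [((0:Int),a0)] from by
          simp [PySem.List.enumerate_cons, PySem.List.enumerate_nil]]
    simp only [List.foldl_cons, List.foldl_nil]
    norm_num [PySem.Int.floordiv]
    simp [PySem.List.slice]
  | [a0,a1] =>
    rw [show PySem.List.slice [a0,a1] none (some 9) = [a0,a1] from by simp [PySem.List.slice_to],
        show PySem.List.enumerate [a0,a1] = [((0:Int),a0),((1:Int),a1)] from by
          simp [PySem.List.enumerate_cons, PySem.List.enumerate_nil]]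
    simp only [List.foldl_cons, List.foldl_nil]
    norm_num [PySem.Int.floordiv]
    simp [PySem.List.slice, List.modify]
  | [a0,a1,a2] =>
    rw [show PySem.List.slice [a0,a1,a2] none (some 9) = [a0,a1,a2] from by simp [PySem.List.slice_to],
        show PySem.List.enumerate [a0,a1,a2] = [((0:Int),a0),((1:Int),a1),((2:Int),a2)] from by
          simp [PySem.List.enumerate_cons, PySem.List.enumerate_nil]]
    simp only [List.foldl_cons, List.foldl_nil]
    norm_num [PySem.Int.floordiv]
    simp [PySem.List.slice, List.modify]
  | [a0,a1,a2,a3] =>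
    rw [show PySem.List.slice [a0,a1,a2,a3] none (some 9) = [a0,a1,a2,a3] from by simp [PySem.List.slice_to],
        show PySem.List.enumerate [a0,a1,a2,a3] = [((0:Int),a0),((1:Int),a1),((2:Int),a2),((3:Int),a3)] from by
          simp [PySem.List.enumerate_cons, PySem.List.enumerate_nil]]
    simp only [List.foldl_cons, List.foldl_nil]
    norm_num [PySem.Int.floordiv]
    simp [PySem.List.slice, List.modify]
  | [a0,a1,a2,a3,a4] =>
    rw [show PySem.List.slice [a0,a1,a2,a3,a4] none (some 9) = [a0,a1,a2,a3,a4] from by simp [PySem.List.slice_to],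
        show PySem.List.enumerate [a0,a1,a2,a3,a4] = [((0:Int),a0),((1:Int),a1),((2:Int),a2),((3:Int),a3),((4:Int),a4)] from by
          simp [PySem.List.enumerate_cons, PySem.List.enumerate_nil]]
    simp only [List.foldl_cons, List.foldl_nil]
    norm_num [PySem.Int.floordiv]
    simp [PySem.List.slice, List.modify]
  | [a0,a1,a2,a3,a4,a5] =>
    rw [show PySem.List.slice [a0,a1,a2,a3,a4,a5] none (some 9) = [a0,a1,a2,a3,a4,a5] from by simp [PySem.List.slice_to],
        show PySem.List.enumerate [a0,a1,a2,a3,a4,a5] = [((0:Int),a0),((1:Int),a1),((2:Int),a2),((3:Int),a3),((4:Int),a4),((5:Int),a5)] from by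
          simp [PySem.List.enumerate_cons, PySem.List.enumerate_nil]]
    simp only [List.foldl_cons, List.foldl_nil]
    norm_num [PySem.Int.floordiv]
    simp [PySem.List.slice, List.modify]
  | [a0,a1,a2,a3,a4,a5,a6] =>
    rw [show PySem.List.slice [a0,a1,a2,a3,a4,a5,a6] none (some 9) = [a0,a1,a2,a3,a4,a5,a6] from by simp [PySem.List.slice_to],
        show PySem.List.enumerate [a0,a1,a2,a3,a4,a5,a6] = [((0:Int),a0),((1:Int),a1),((2:Int),a2),((3:Int),a3),((4:Int),a4),((5:Int),a5),((6:Int),a6)] from by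
          simp [PySem.List.enumerate_cons, PySem.List.enumerate_nil]]
    simp only [List.foldl_cons, List.foldl_nil]
    norm_num [PySem.Int.floordiv]
    simp [PySem.List.slice, List.modify]
  | [a0,a1,a2,a3,a4,a5,a6,a7] =>
    rw [show PySem.List.slice [a0,a1,a2,a3,a4,a5,a6,a7] none (some 9) = [a0,a1,a2,a3,a4,a5,a6,a7] from by simp [PySem.List.slice_to],
        show PySem.List.enumerate [a0,a1,a2,a3,a4,a5,a6,a7] = [((0:Int),a0),((1:Int),a1),((2:Int),a2),((3:Int),a3),((4:Int),a4),((5:Int),a5),((6:Int),a6),((7:Int),a7)] from by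
          simp [PySem.List.enumerate_cons, PySem.List.enumerate_nil]]
    simp only [List.foldl_cons, List.foldl_nil]
    norm_num [PySem.Int.floordiv]
    simp [PySem.List.slice, List.modify]
  | a0::a1::a2::a3::a4::a5::a6::a7::a8::t =>
    rw [show PySem.List.slice (a0::a1::a2::a3::a4::a5::a6::a7::a8::t) none (some 9) = [a0,a1,a2,a3,a4,a5,a6,a7,a8] from by
          simp [PySem.List.slice_to],
        show PySem.List.slice (a0::a1::a2::a3::a4::a5::a6::a7::a8::t) (some 0) (some 3) = [a0,a1,a2] from rfl,
        show PySem.List.slice (a0::a1::a2::a3::a4::a5::a6::a7::a8::t) (some 3) (some 6) = [a3,a4,a5] from rfl,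
        show PySem.List.slice (a0::a1::a2::a3::a4::a5::a6::a7::a8::t) (some 6) (some 9) = [a6,a7,a8] from rfl,
        show PySem.List.enumerate [a0,a1,a2,a3,a4,a5,a6,a7,a8] = [((0:Int),a0),((1:Int),a1),((2:Int),a2),((3:Int),a3),((4:Int),a4),((5:Int),a5),((6:Int),a6),((7:Int),a7),((8:Int),a8)] from by
          simp [PySem.List.enumerate_cons, PySem.List.enumerate_nil]]
    simp only [List.foldl_cons, List.foldl_nil]
    norm_num [PySem.Int.floordiv]
    simp [List.modify]

theorem pvRow2 (b0 b1 b2 b3 b4 b5 b6 b7 b8 : List Int) (r : List Int) (i : Int)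
    (hk : PySem.Int.floordiv i 3 = 2) :
    (PySem.List.enumerate (PySem.List.slice r none (some 9))).foldl
      (fun bs jv => bs.modify (3 * (PySem.Int.floordiv jv.1 3) + PySem.Int.floordiv i 3).toNat
        (fun b => b ++ [jv.2])) [b0,b1,b2,b3,b4,b5,b6,b7,b8] =
    [b0, b1, b2 ++ PySem.List.slice r (some 0) (some 3), b3, b4, b5 ++ PySem.List.slice r (some 3) (some 6), b6, b7, b8 ++ PySem.List.slice r (some 6) (some 9)] := by
  rw [hk]
  match r with
  | [] =>
    simp [PySem.List.slice, PySem.List.enumerate_nil, List.foldl_nil]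
  | [a0] =>
    rw [show PySem.List.slice [a0] none (some 9) = [a0] from by simp [PySem.List.slice_to],
        show PySem.List.enumerate [a0] = [((0:Int),a0)] from by
          simp [PySem.List.enumerate_cons, PySem.List.enumerate_nil]]
    simp only [List.foldl_cons, List.foldl_nil]
    norm_num [PySem.Int.floordiv]
    simp [PySem.List.slice, List.modify]
  | [a0,a1] =>
    rw [show PySem.List.slice [a0,a1] none (some 9) = [a0,a1] from by simp [PySem.List.slice_to],
        show PySem.List.enumerate [a0,a1] = [((0:Int),a0),((1:Int),a1)] from by
          simp [PySem.List.enumerate_cons, PySem.List.enumerate_nil]]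
    simp only [List.foldl_cons, List.foldl_nil]
    norm_num [PySem.Int.floordiv]
    simp [PySem.List.slice, List.modify]
  | [a0,a1,a2] =>
    rw [show PySem.List.slice [a0,a1,a2] none (some 9) = [a0,a1,a2] from by simp [PySem.List.slice_to],
        show PySem.List.enumerate [a0,a1,a2] = [((0:Int),a0),((1:Int),a1),((2:Int),a2)] from by
          simp [PySem.List.enumerate_cons, PySem.List.enumerate_nil]]
    simp only [List.foldl_cons, List.foldl_nil]
    norm_num [PySem.Int.floordiv]
    simp [PySem.List.slice, List.modify]
  | [a0,a1,a2,a3] =>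
    rw [show PySem.List.slice [a0,a1,a2,a3] none (some 9) = [a0,a1,a2,a3] from by simp [PySem.List.slice_to],
        show PySem.List.enumerate [a0,a1,a2,a3] = [((0:Int),a0),((1:Int),a1),((2:Int),a2),((3:Int),a3)] from by
          simp [PySem.List.enumerate_cons, PySem.List.enumerate_nil]]
    simp only [List.foldl_cons, List.foldl_nil]
    norm_num [PySem.Int.floordiv]
    simp [PySem.List.slice, List.modify]
  | [a0,a1,a2,a3,a4] =>
    rw [show PySem.List.slice [a0,a1,a2,a3,a4] none (some 9) = [a0,a1,a2,a3,a4] from by simp [PySem.List.slice_to],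
        show PySem.List.enumerate [a0,a1,a2,a3,a4] = [((0:Int),a0),((1:Int),a1),((2:Int),a2),((3:Int),a3),((4:Int),a4)] from by
          simp [PySem.List.enumerate_cons, PySem.List.enumerate_nil]]
    simp only [List.foldl_cons, List.foldl_nil]
    norm_num [PySem.Int.floordiv]
    simp [PySem.List.slice, List.modify]
  | [a0,a1,a2,a3,a4,a5] =>
    rw [show PySem.List.slice [a0,a1,a2,a3,a4,a5] none (some 9) = [a0,a1,a2,a3,a4,a5] from by simp [PySem.List.slice_to],
        show PySem.List.enumerate [a0,a1,a2,a3,a4,a5] = [((0:Int),a0),((1:Int),a1),((2:Int),a2),((3:Int),a3),((4:Int),a4),((5:Int),a5)] from by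
          simp [PySem.List.enumerate_cons, PySem.List.enumerate_nil]]
    simp only [List.foldl_cons, List.foldl_nil]
    norm_num [PySem.Int.floordiv]
    simp [PySem.List.slice, List.modify]
  | [a0,a1,a2,a3,a4,a5,a6] =>
    rw [show PySem.List.slice [a0,a1,a2,a3,a4,a5,a6] none (some 9) = [a0,a1,a2,a3,a4,a5,a6] from by simp [PySem.List.slice_to],
        show PySem.List.enumerate [a0,a1,a2,a3,a4,a5,a6] = [((0:Int),a0),((1:Int),a1),((2:Int),a2),((3:Int),a3),((4:Int),a4),((5:Int),a5),((6:Int),a6)] from by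
          simp [PySem.List.enumerate_cons, PySem.List.enumerate_nil]]
    simp only [List.foldl_cons, List.foldl_nil]
    norm_num [PySem.Int.floordiv]
    simp [PySem.List.slice, List.modify]
  | [a0,a1,a2,a3,a4,a5,a6,a7] =>
    rw [show PySem.List.slice [a0,a1,a2,a3,a4,a5,a6,a7] none (some 9) = [a0,a1,a2,a3,a4,a5,a6,a7] from by simp [PySem.List.slice_to],
        show PySem.List.enumerate [a0,a1,a2,a3,a4,a5,a6,a7] = [((0:Int),a0),((1:Int),a1),((2:Int),a2),((3:Int),a3),((4:Int),a4),((5:Int),a5),((6:Int),a6),((7:Int),a7)] from by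
          simp [PySem.List.enumerate_cons, PySem.List.enumerate_nil]]
    simp only [List.foldl_cons, List.foldl_nil]
    norm_num [PySem.Int.floordiv]
    simp [PySem.List.slice, List.modify]
  | a0::a1::a2::a3::a4::a5::a6::a7::a8::t =>
    rw [show PySem.List.slice (a0::a1::a2::a3::a4::a5::a6::a7::a8::t) none (some 9) = [a0,a1,a2,a3,a4,a5,a6,a7,a8] from by
          simp [PySem.List.slice_to],
        show PySem.List.slice (a0::a1::a2::a3::a4::a5::a6::a7::a8::t) (some 0) (some 3) = [a0,a1,a2] from rfl,
        show PySem.List.slice (a0::a1::a2::a3::a4::a5::a6::a7::a8::t) (some 3) (some 6) = [a3,a4,a5] from rfl,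
        show PySem.List.slice (a0::a1::a2::a3::a4::a5::a6::a7::a8::t) (some 6) (some 9) = [a6,a7,a8] from rfl,
        show PySem.List.enumerate [a0,a1,a2,a3,a4,a5,a6,a7,a8] = [((0:Int),a0),((1:Int),a1),((2:Int),a2),((3:Int),a3),((4:Int),a4),((5:Int),a5),((6:Int),a6),((7:Int),a7),((8:Int),a8)] from by
          simp [PySem.List.enumerate_cons, PySem.List.enumerate_nil]]
    simp only [List.foldl_cons, List.foldl_nil]
    norm_num [PySem.Int.floordiv]
    simp [List.modify]

-- indexing a board with ≥ 9 known head rows at the nine literal indices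
theorem pvIdx0 {α : Type} (l0 l1 l2 l3 l4 l5 l6 l7 l8 : α) (t : List α) (d : α) :
    PySem.List.pyGetD (l0::l1::l2::l3::l4::l5::l6::l7::l8::t) 0 d = l0 := by simp [pysem]
theorem pvIdx1 {α : Type} (l0 l1 l2 l3 l4 l5 l6 l7 l8 : α) (t : List α) (d : α) :
    PySem.List.pyGetD (l0::l1::l2::l3::l4::l5::l6::l7::l8::t) 1 d = l1 := by simp [pysem]
theorem pvIdx2 {α : Type} (l0 l1 l2 l3 l4 l5 l6 l7 l8 : α) (t : List α) (d : α) :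
    PySem.List.pyGetD (l0::l1::l2::l3::l4::l5::l6::l7::l8::t) 2 d = l2 := by simp [pysem]
theorem pvIdx3 {α : Type} (l0 l1 l2 l3 l4 l5 l6 l7 l8 : α) (t : List α) (d : α) :
    PySem.List.pyGetD (l0::l1::l2::l3::l4::l5::l6::l7::l8::t) 3 d = l3 := by simp [pysem]
theorem pvIdx4 {α : Type} (l0 l1 l2 l3 l4 l5 l6 l7 l8 : α) (t : List α) (d : α) :
    PySem.List.pyGetD (l0::l1::l2::l3::l4::l5::l6::l7::l8::t) 4 d = l4 := by simp [pysem]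
theorem pvIdx5 {α : Type} (l0 l1 l2 l3 l4 l5 l6 l7 l8 : α) (t : List α) (d : α) :
    PySem.List.pyGetD (l0::l1::l2::l3::l4::l5::l6::l7::l8::t) 5 d = l5 := by simp [pysem]
theorem pvIdx6 {α : Type} (l0 l1 l2 l3 l4 l5 l6 l7 l8 : α) (t : List α) (d : α) :
    PySem.List.pyGetD (l0::l1::l2::l3::l4::l5::l6::l7::l8::t) 6 d = l6 := by simp [pysem]
theorem pvIdx7 {α : Type} (l0 l1 l2 l3 l4 l5 l6 l7 l8 : α) (t : List α) (d : α) :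
    PySem.List.pyGetD (l0::l1::l2::l3::l4::l5::l6::l7::l8::t) 7 d = l7 := by simp [pysem]
theorem pvIdx8 {α : Type} (l0 l1 l2 l3 l4 l5 l6 l7 l8 : α) (t : List α) (d : α) :
    PySem.List.pyGetD (l0::l1::l2::l3::l4::l5::l6::l7::l8::t) 8 d = l8 := by simp [pysem]

set_option maxHeartbeats 2000000 in
theorem pv_eq (r0 r1 r2 r3 r4 r5 r6 r7 r8 : List Int) (t : List (List Int)) :
    get_block_sets_as_rows (r0 :: r1 :: r2 :: r3 :: r4 :: r5 :: r6 :: r7 :: r8 :: t) =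
    get_block_sets_as_rows_alt (r0 :: r1 :: r2 :: r3 :: r4 :: r5 :: r6 :: r7 :: r8 :: t) := by
  rw [get_block_sets_as_rows, get_block_sets_as_rows_alt,
    show PySem.List.pyRange 0 9 3 = [0,3,6] from by decide,
    show PySem.List.pyRange 0 9 1 = [0,1,2,3,4,5,6,7,8] from by decide]
  simp only [List.foldl_cons, List.foldl_nil]
  rw [show (List.replicate 9 ([] : List Int)) = [[],[],[],[],[],[],[],[],[]] from rfl]
  simp only [pvIdx0, pvIdx1, pvIdx2, pvIdx3, pvIdx4, pvIdx5, pvIdx6, pvIdx7, pvIdx8]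
  rw [pvRow0 _ _ _ _ _ _ _ _ _ r0 0 (by decide), pvRow0 _ _ _ _ _ _ _ _ _ r1 1 (by decide),
      pvRow0 _ _ _ _ _ _ _ _ _ r2 2 (by decide), pvRow1 _ _ _ _ _ _ _ _ _ r3 3 (by decide),
      pvRow1 _ _ _ _ _ _ _ _ _ r4 4 (by decide), pvRow1 _ _ _ _ _ _ _ _ _ r5 5 (by decide),
      pvRow2 _ _ _ _ _ _ _ _ _ r6 6 (by decide), pvRow2 _ _ _ _ _ _ _ _ _ r7 7 (by decide),
      pvRow2 _ _ _ _ _ _ _ _ _ r8 8 (by decide)]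
  simp only [show PySem.List.pyRange (0+(0:Int)) (3+0) 1 = [0,1,2] from by decide,
    show PySem.List.pyRange (0+(3:Int)) (3+3) 1 = [3,4,5] from by decide,
    show PySem.List.pyRange (0+(6:Int)) (3+6) 1 = [6,7,8] from by decide,
    List.foldl_cons, List.foldl_nil, List.nil_append]
  norm_num only
  simp only [pvIdx0, pvIdx1, pvIdx2, pvIdx3, pvIdx4, pvIdx5, pvIdx6, pvIdx7, pvIdx8,
    List.append_assoc, List.nil_append, List.cons_append]

-- ===== VERDICT (by name: the statement is the Claim_ definition above) =====
theorem get_block_sets_as_rows_spec : Claim_equal_get_block_sets_as_rows := by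
  intro board _dom pre
  unfold Pre_get_block_sets_as_rows at pre
  unfold Spec_get_block_sets_as_rows
  match board, pre with
  | r0 :: r1 :: r2 :: r3 :: r4 :: r5 :: r6 :: r7 :: r8 :: t, _ =>
    exact pv_eq r0 r1 r2 r3 r4 r5 r6 r7 r8 t
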